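-- pv_equiv track=rewrite | github.com/gabemahoney/waggle | src/waggle/state_parser.py | _parse_check_permission
-- ===== SOURCE A (Python) =====
-- def _parse_check_permission(content: str) -> dict:
--     """Extract structured data from a check_permission prompt.
--
--     Expected layout:
--         <tool_type line>
--
--           <command>
--           <description>
--
--         Permission rule ...
--
--         Do you want to proceed?
--     """
--     lines = content.splitlines()
--
--     perm_idx = next(
--         (i for i, line in enumerate(lines) if "Permission rule" in line), None
--     )
--
--     tool_type = ""
--     command = ""
--     description = ""
--
--     if perm_idx is not None:
--         # Collect non-blank lines before "Permission rule"
--         before = lines[:perm_idx]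
--         while before and not before[-1].strip():
--             before.pop()
--         while before and not before[0].strip():
--             before.pop(0)
--
--         if before:
--             # First non-blank line is tool type
--             tool_type = before[0].strip()
--             # Remaining non-blank lines: first is command, second is description
--             rest = [line.strip() for line in before[1:] if line.strip()]
--             if rest:
--                 command = rest[0]
--             if len(rest) > 1:
--                 description = rest[1]
--
--     return {
--         "tool_type": tool_type,
--         "command": command,
--         "description": description,
--     }
-- ===== SOURCE B (Python) =====
-- def _parse_check_permission(content: str) -> dict:
--     """Single accumulating scan: collect stripped non-blank lines until the
--     'Permission rule' line; fields are the first three collected lines."""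
--     fields = []
--     found = False
--     for line in content.splitlines():
--         if "Permission rule" in line:
--             found = True
--             break
--         s = line.strip()
--         if s:
--             fields.append(s)
--     if not found:
--         fields = []
--     return {
--         "tool_type": fields[0] if fields else "",
--         "command": fields[1] if len(fields) > 1 else "",
--         "description": fields[2] if len(fields) > 2 else "",
--     }
-- ===== Notes on version B (the rewrite author's own statement) =====
-- stated objective: simpler
-- what changed: A finds the marker line's index via enumerate, slices the prefix, pops blank lines from both ends, and re-filters the remainder; B is a single accumulating scan that collects stripped non-blank lines until the marker line and reads the three fields off that list.
import Mathlib
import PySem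

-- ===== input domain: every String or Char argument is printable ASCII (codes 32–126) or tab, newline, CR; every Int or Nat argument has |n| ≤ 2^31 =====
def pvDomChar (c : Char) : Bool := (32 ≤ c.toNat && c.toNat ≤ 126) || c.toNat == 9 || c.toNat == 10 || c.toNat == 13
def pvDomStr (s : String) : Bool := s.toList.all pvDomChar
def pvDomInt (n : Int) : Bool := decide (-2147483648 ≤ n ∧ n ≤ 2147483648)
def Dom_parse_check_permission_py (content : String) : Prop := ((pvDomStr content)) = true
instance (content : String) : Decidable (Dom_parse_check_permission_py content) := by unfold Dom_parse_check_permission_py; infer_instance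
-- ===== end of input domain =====

-- B replaces A's find-index + slice + pop-both-ends + re-filter with one accumulating
-- scan over the lines (objective: simpler); return values are proved identical.

-- ===== PORT A =====
-- "Permission rule" in line
def pvP (l : String) : Bool := PySem.Str.isIn "Permission rule" l

-- while before and not before[-1].strip(): before.pop()
def pvTrimEnd (xs : List String) : List String :=
  if h : xs = [] then []
  else if PySem.Str.strip (xs.getLast h) = "" then pvTrimEnd xs.dropLast else xs
termination_by xs.length
decreasing_by
  have := List.length_pos_iff.mpr h
  simp [List.length_dropLast]; omega

-- while before and not before[0].strip(): before.pop(0)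
def pvTrimStart : List String → List String
  | [] => []
  | x :: rest => if PySem.Str.strip x = "" then pvTrimStart rest else x :: rest

-- [line.strip() for line in ys if line.strip()]
def pvFiltNB (xs : List String) : List String :=
  xs.filterMap (fun l => if PySem.Str.strip l = "" then none else some (PySem.Str.strip l))

def parse_check_permission_py (content : String) : List (String × String) :=
  let lines := PySem.Str.splitlines content
  -- next((i for i, line in enumerate(lines) if "Permission rule" in line), None)
  let permIdx : Option Int :=
    ((PySem.List.enumerate lines 0).find? (fun p => pvP p.2)).map (·.1)
  let t : String × String × String :=
    match permIdx with
    | none => ("", "", "")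
    | some i =>
      let before := PySem.List.slice lines none (some i)
      let before := pvTrimStart (pvTrimEnd before)
      match before with
      | [] => ("", "", "")
      | b0 :: brest =>
        let tool := PySem.Str.strip b0
        let rest := pvFiltNB brest
        match rest with
        | [] => (tool, "", "")
        | [c] => (tool, c, "")
        | c :: d :: _ => (tool, c, d)
  [("tool_type", t.1), ("command", t.2.1), ("description", t.2.2)]

-- ===== PORT B =====
-- the for-loop with break: collect stripped non-blank lines, stop at the first
-- "Permission rule" line, remember whether one was found
def pvScan : List String → List String × Bool
  | [] => ([], false)
  | l :: rest =>
    if pvP l then ([], true)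
    else
      let s := PySem.Str.strip l
      let r := pvScan rest
      if s = "" then r else (s :: r.1, r.2)

def parse_check_permission_py_alt (content : String) : List (String × String) :=
  let r := pvScan (PySem.Str.splitlines content)
  let fields := if r.2 then r.1 else []
  [("tool_type", fields.getD 0 ""), ("command", fields.getD 1 ""), ("description", fields.getD 2 "")]

-- ===== PRECONDITION & SPEC =====
def Spec_parse_check_permission_py (content : String) (out : List (String × String)) : Prop := out = parse_check_permission_py_alt content
instance (content : String) (out : List (String × String)) : Decidable (Spec_parse_check_permission_py content out) := by unfold Spec_parse_check_permission_py; infer_instance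

-- ===== CLAIM (what is proved, stated in full; the proofs are below) =====
def Claim_equal_parse_check_permission_py : Prop := ∀ (content : String), Dom_parse_check_permission_py content → Spec_parse_check_permission_py content (parse_check_permission_py content)

-- ===== LEMMAS AND PROOFS =====

theorem pvScan_spec (xs : List String) :
    pvScan xs = (pvFiltNB (xs.takeWhile (fun l => !pvP l)), xs.any pvP) := by
  induction xs with
  | nil => simp [pvScan, pvFiltNB]
  | cons l rest ih =>
    by_cases hp : pvP l
    · simp [pvScan, hp, pvFiltNB]
    · by_cases hs : PySem.Str.strip l = "" <;>
        simp [pvScan, hp, hs, pvFiltNB, ih]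

theorem pvFind_enum (xs : List String) (s : Int) :
    (((PySem.List.enumerate xs s).find? (fun p => pvP p.2)).map (·.1))
      = (xs.findIdx? pvP).map (fun k => s + (k : Int)) := by
  induction xs generalizing s with
  | nil => simp [PySem.List.enumerate]
  | cons l rest ih =>
    by_cases hp : pvP l
    · simp [PySem.List.enumerate_cons, hp, List.findIdx?_cons]
    · simp only [PySem.List.enumerate_cons, List.find?_cons, hp, List.findIdx?_cons,
        Bool.false_eq_true, if_false, cond_false]
      rw [ih]
      cases rest.findIdx? pvP <;> simp <;> ring

theorem pvTake_findIdx (xs : List String) (k : Nat) (h : xs.findIdx? pvP = some k) :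
    xs.take k = xs.takeWhile (fun l => !pvP l) ∧ xs.any pvP = true := by
  induction xs generalizing k with
  | nil => simp at h
  | cons l rest ih =>
    by_cases hp : pvP l
    · simp [List.findIdx?_cons, hp] at h
      subst h
      simp [hp]
    · simp [List.findIdx?_cons, hp] at h
      obtain ⟨k', hk', rfl⟩ := h
      obtain ⟨h1, h2⟩ := ih k' hk'
      simp [List.take_succ_cons, hp, h1, h2]

theorem pvFiltNB_trimEnd (xs : List String) : pvFiltNB (pvTrimEnd xs) = pvFiltNB xs := by
  induction xs using pvTrimEnd.induct with
  | case1 => simp [pvTrimEnd]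
  | case2 xs h hb ih =>
    rw [pvTrimEnd]
    simp only [h, dite_false, hb, if_true]
    rw [ih]
    conv_rhs => rw [← List.dropLast_concat_getLast h]
    simp [pvFiltNB, List.filterMap_append, hb]
  | case3 xs h hb =>
    rw [pvTrimEnd]
    simp [h, hb]

theorem pvFiltNB_trimStart (xs : List String) : pvFiltNB (pvTrimStart xs) = pvFiltNB xs := by
  induction xs with
  | nil => rfl
  | cons x rest ih =>
    by_cases hs : PySem.Str.strip x = "" <;> simp [pvTrimStart, hs, pvFiltNB] at ih ⊢ <;> simp [ih]

theorem pvTrimStart_head (xs : List String) (y : String) (ys : List String)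
    (h : pvTrimStart xs = y :: ys) : PySem.Str.strip y ≠ "" := by
  induction xs with
  | nil => simp [pvTrimStart] at h
  | cons x rest ih =>
    by_cases hs : PySem.Str.strip x = ""
    · exact ih (by simpa [pvTrimStart, hs] using h)
    · simp [pvTrimStart, hs] at h
      rw [← h.1]; exact hs

theorem pvCore (content : String) :
    parse_check_permission_py content = parse_check_permission_py_alt content := by
  unfold parse_check_permission_py parse_check_permission_py_alt
  simp only [pvScan_spec, pvFind_enum]
  cases h : (PySem.Str.splitlines content).findIdx? pvP with
  | none =>
    have hany : (PySem.Str.splitlines content).any pvP = false := by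
      rw [List.any_eq_false]
      intro x hx
      have := List.findIdx?_eq_none_iff.mp h x hx
      simpa using this
    simp [hany]
  | some k =>
    obtain ⟨htake, hany⟩ := pvTake_findIdx _ k h
    simp only [Option.pure_def, Option.bind_eq_bind, Option.bind_some, Option.map_some, hany, if_true]
    rw [PySem.List.slice_to _ (by positivity)]
    have hk : ((0:Int) + (k:Int)).toNat = k := by omega
    rw [hk, htake]
    generalize (PySem.Str.splitlines content).takeWhile (fun l => !pvP l) = before at *
    have hF : pvFiltNB (pvTrimStart (pvTrimEnd before)) = pvFiltNB before := by
      rw [pvFiltNB_trimStart, pvFiltNB_trimEnd]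
    cases htr : pvTrimStart (pvTrimEnd before) with
    | nil =>
      rw [htr] at hF
      have hFe : pvFiltNB before = [] := by rw [← hF]; rfl
      simp [hFe]
    | cons b0 brest =>
      rw [htr] at hF
      have hb0 : PySem.Str.strip b0 ≠ "" := pvTrimStart_head _ _ _ htr
      have hcons : pvFiltNB before = PySem.Str.strip b0 :: pvFiltNB brest := by
        rw [← hF]; simp [pvFiltNB, hb0]
      rw [hcons]
      cases hr : pvFiltNB brest with
      | nil => simp [hr]
      | cons c cs => cases cs <;> simp [hr]

-- ===== VERDICT (by name: the statement is the Claim_ definition above) =====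
theorem parse_check_permission_py_spec : Claim_equal_parse_check_permission_py := by
  intro content _
  unfold Spec_parse_check_permission_py
  exact pvCore content
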